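-- pv_equiv track=rewrite | github.com/candematelica/Teoria-de-Algoritmos | TP3/backtracking.py | _defensa_tribu_agua_backtracking
-- ===== SOURCE A (Python) =====
-- def suma_cuadratica(subgrupos):
--     return sum(sum(maestro[1] for maestro in subgrupo) ** 2 for subgrupo in subgrupos)
--
-- def _defensa_tribu_agua_backtracking(maestros, k, subgrupos, mejor_suma, mejor_solucion, i):
--     if i >= len(maestros):
--         suma_actual = suma_cuadratica(subgrupos)
--         if suma_actual < mejor_suma:
--             return suma_actual, [list(subgrupo) for subgrupo in subgrupos]
--         return mejor_suma, mejor_solucion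
--
--     for j in range(k):
--         subgrupos[j].append(maestros[i])
--         if (len(subgrupos[j]) - 1) <= (len(maestros) - k):
--             mejor_suma, mejor_solucion = _defensa_tribu_agua_backtracking(maestros, k, subgrupos, mejor_suma, mejor_solucion, i + 1)
--         subgrupos[j].pop()
--
--     return mejor_suma, mejor_solucion
-- ===== SOURCE B (Python) =====
-- def _defensa_tribu_agua_backtracking(maestros, k, subgrupos, mejor_suma, mejor_solucion, i):
--     # Staged: first enumerate every leaf snapshot of the search tree in DFS
--     # order (purely functionally, without mutating subgrupos), then scan the
--     # snapshot list once keeping the first strictly improving sum of squares.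
--     n = len(maestros)
--     limit = n - k + 1
--
--     def leaves(subs, t):
--         if t >= n:
--             return [[list(g) for g in subs]]
--         out = []
--         for j in range(k):
--             g = subs[j]
--             if len(g) < limit:
--                 out.extend(leaves(subs[:j] + [g + [maestros[t]]] + subs[j + 1:], t + 1))
--         return out
--
--     best, best_sol = mejor_suma, mejor_solucion
--     for snap in leaves(subgrupos, i):
--         s = sum(sum(v for _, v in g) ** 2 for g in snap)
--         if s < best:
--             best, best_sol = s, snap
--     return best, best_sol
-- ===== Notes on version B (the rewrite author's own statement) =====
-- stated objective: alternative
-- what changed: B is staged instead of fused: it first enumerates every leaf snapshot of the backtracking tree in DFS order as a purely functional list (no mutation of subgrupos), then scans that list once picking the first strictly improving sum of squares, instead of A's recursion that threads the running best through mutating backtracking.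
import Mathlib
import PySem

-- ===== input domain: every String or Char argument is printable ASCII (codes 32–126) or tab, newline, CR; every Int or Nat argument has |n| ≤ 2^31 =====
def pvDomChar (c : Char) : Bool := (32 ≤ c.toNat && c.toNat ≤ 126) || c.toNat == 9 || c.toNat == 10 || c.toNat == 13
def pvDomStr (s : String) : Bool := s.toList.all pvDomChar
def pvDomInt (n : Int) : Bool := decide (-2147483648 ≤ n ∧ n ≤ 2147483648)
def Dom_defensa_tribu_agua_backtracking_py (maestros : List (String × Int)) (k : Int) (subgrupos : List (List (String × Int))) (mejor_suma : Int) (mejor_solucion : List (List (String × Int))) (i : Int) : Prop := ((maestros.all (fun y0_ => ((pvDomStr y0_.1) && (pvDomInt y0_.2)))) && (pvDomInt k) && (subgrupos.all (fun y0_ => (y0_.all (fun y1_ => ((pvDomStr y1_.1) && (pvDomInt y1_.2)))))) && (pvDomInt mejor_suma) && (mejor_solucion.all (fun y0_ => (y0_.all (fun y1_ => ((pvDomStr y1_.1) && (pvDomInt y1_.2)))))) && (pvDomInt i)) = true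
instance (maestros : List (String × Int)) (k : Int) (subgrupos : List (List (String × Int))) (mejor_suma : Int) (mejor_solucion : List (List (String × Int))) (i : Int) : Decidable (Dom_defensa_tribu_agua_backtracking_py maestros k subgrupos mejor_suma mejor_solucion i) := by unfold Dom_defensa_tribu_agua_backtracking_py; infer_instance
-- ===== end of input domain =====

-- B is staged: it first enumerates every leaf snapshot of A's search tree in DFS order,
-- purely functionally, then scans that list once keeping the best sum of squares.
-- A mutates subgrupos transiently during the search but restores it before returning; the
-- equivalence proved here is about the return value.

-- ===== PORT A =====
-- sum(maestro[1] for maestro in subgrupo)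
def pvGSum (g : List (String × Int)) : Int := (g.map (fun m => m.2)).sum
-- suma_cuadratica
def pvSumaCuadratica (subs : List (List (String × Int))) : Int :=
  (subs.map (fun g => pvGSum g ^ 2)).sum

-- recursion of A; fuel = (len(maestros) - i).toNat is a termination device:
-- fuel = 0 ↔ i ≥ len(maestros)
def pvGoA (maestros : List (String × Int)) (k : Int) :
    Nat → List (List (String × Int)) → Int → List (List (String × Int)) → Int →
    Int × (List (List (String × Int)))
  | 0, subs, best, bestSol, _ =>
      let sumaActual := pvSumaCuadratica subs
      if sumaActual < best then (sumaActual, subs.map (fun g => g)) else (best, bestSol)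
  | fuel + 1, subs, best, bestSol, i =>
      (PySem.List.pyRange 0 k 1).foldl
        (fun acc j =>
          match PySem.List.pyGet? subs j, PySem.List.pyGet? maestros i with
          | some g, some m =>
              let subs' := subs.set j.toNat (g ++ [m])
              if ((g ++ [m]).length : Int) - 1 ≤ (maestros.length : Int) - k then
                pvGoA maestros k fuel subs' acc.1 acc.2 (i + 1)
              else acc
          | _, _ => acc)
        (best, bestSol)

def defensa_tribu_agua_backtracking_py (maestros : List (String × Int)) (k : Int) (subgrupos : List (List (String × Int))) (mejor_suma : Int) (mejor_solucion : List (List (String × Int))) (i : Int) : Int × (List (List (String × Int))) :=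
  pvGoA maestros k ((maestros.length - i).toNat) subgrupos mejor_suma mejor_solucion i

-- ===== PORT B =====
-- leaves of Source B: all leaf snapshots reachable from (subs, t), in DFS order; fuel as in A's port.
-- subs[:j] + [g + [maestros[t]]] + subs[j+1:] is written List.set (same list for 0 ≤ j < len subs,
-- which holds whenever pyGet? subs j succeeds).
def pvLeaves (maestros : List (String × Int)) (k limit : Int) :
    Nat → List (List (String × Int)) → Int → List (List (List (String × Int)))
  | 0, subs, _ => [subs.map (fun g => g)]
  | fuel + 1, subs, t =>
      (PySem.List.pyRange 0 k 1).foldl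
        (fun out j =>
          match PySem.List.pyGet? subs j with
          | some g =>
              if (g.length : Int) < limit then
                match PySem.List.pyGet? maestros t with
                | some m => out ++ pvLeaves maestros k limit fuel (subs.set j.toNat (g ++ [m])) (t + 1)
                | none => out
              else out
          | none => out)
        []

-- sum(sum(v for _, v in g) ** 2 for g in snap)
def pvSnapVal (snap : List (List (String × Int))) : Int :=
  (snap.map (fun g => ((g.map (fun mv => mv.2)).sum) ^ 2)).sum

def defensa_tribu_agua_backtracking_py_alt (maestros : List (String × Int)) (k : Int) (subgrupos : List (List (String × Int))) (mejor_suma : Int) (mejor_solucion : List (List (String × Int))) (i : Int) : Int × (List (List (String × Int))) :=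
  (pvLeaves maestros k ((maestros.length : Int) - k + 1) ((maestros.length - i).toNat) subgrupos i).foldl
    (fun acc snap =>
      let s := pvSnapVal snap
      if s < acc.1 then (s, snap) else acc)
    (mejor_suma, mejor_solucion)

-- ===== PRECONDITION & SPEC =====
-- Pre_ excludes exactly the inputs on which A raises IndexError: i < len(maestros) together
-- with k exceeding the number of subgroups, or a negative i below -len(maestros) while k ≥ 1.
def Pre_defensa_tribu_agua_backtracking_py (maestros : List (String × Int)) (k : Int) (subgrupos : List (List (String × Int))) (mejor_suma : Int) (mejor_solucion : List (List (String × Int))) (i : Int) : Prop :=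
  i < (maestros.length : Int) →
    (k ≤ 0 ∨ (k ≤ (subgrupos.length : Int) ∧ -(maestros.length : Int) ≤ i))
instance (maestros : List (String × Int)) (k : Int) (subgrupos : List (List (String × Int))) (mejor_suma : Int) (mejor_solucion : List (List (String × Int))) (i : Int) : Decidable (Pre_defensa_tribu_agua_backtracking_py maestros k subgrupos mejor_suma mejor_solucion i) := by unfold Pre_defensa_tribu_agua_backtracking_py; infer_instance

def pvWitness_defensa_tribu_agua_backtracking_py : (List (String × Int)) × Int × (List (List (String × Int))) × Int × (List (List (String × Int))) × Int :=
  ([("a", 1), ("b", 2), ("c", 3)], 2, [[], []], 1000, [], 0)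

def Spec_defensa_tribu_agua_backtracking_py (maestros : List (String × Int)) (k : Int) (subgrupos : List (List (String × Int))) (mejor_suma : Int) (mejor_solucion : List (List (String × Int))) (i : Int) (out : Int × (List (List (String × Int)))) : Prop := out = defensa_tribu_agua_backtracking_py_alt maestros k subgrupos mejor_suma mejor_solucion i
instance (maestros : List (String × Int)) (k : Int) (subgrupos : List (List (String × Int))) (mejor_suma : Int) (mejor_solucion : List (List (String × Int))) (i : Int) (out : Int × (List (List (String × Int)))) : Decidable (Spec_defensa_tribu_agua_backtracking_py maestros k subgrupos mejor_suma mejor_solucion i out) := by unfold Spec_defensa_tribu_agua_backtracking_py; infer_instance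

-- ===== CLAIM (what is proved, stated in full; the proofs are below) =====
def Claim_equal_defensa_tribu_agua_backtracking_py : Prop := ∀ (maestros : List (String × Int)) (k : Int) (subgrupos : List (List (String × Int))) (mejor_suma : Int) (mejor_solucion : List (List (String × Int))) (i : Int), Dom_defensa_tribu_agua_backtracking_py maestros k subgrupos mejor_suma mejor_solucion i → Pre_defensa_tribu_agua_backtracking_py maestros k subgrupos mejor_suma mejor_solucion i → Spec_defensa_tribu_agua_backtracking_py maestros k subgrupos mejor_suma mejor_solucion i (defensa_tribu_agua_backtracking_py maestros k subgrupos mejor_suma mejor_solucion i)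

-- ===== LEMMAS AND PROOFS =====
-- B's selection step over the leaf list
def pvStep (acc : Int × List (List (String × Int))) (snap : List (List (String × Int))) :
    Int × List (List (String × Int)) :=
  let s := pvSnapVal snap
  if s < acc.1 then (s, snap) else acc

-- folding the selection over a concat-map of per-j leaf lists = nested fold
lemma pv_foldl_flatMap {α β γ : Type} (step : γ → β → γ) (L : α → List β) (xs : List α) (init : γ) :
    (xs.flatMap L).foldl step init = xs.foldl (fun acc x => (L x).foldl step acc) init := by
  induction xs generalizing init with
  | nil => simp
  | cons x xs ih => simp [List.flatMap_cons, List.foldl_append, ih]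

-- fused (A) = staged (B): A's recursion equals selecting over the leaf list
lemma pv_goA_eq (maestros : List (String × Int)) (k : Int) :
    ∀ (fuel : Nat) (subs : List (List (String × Int))) (best : Int)
      (bestSol : List (List (String × Int))) (i : Int),
      pvGoA maestros k fuel subs best bestSol i
        = (pvLeaves maestros k ((maestros.length : Int) - k + 1) fuel subs i).foldl
            pvStep (best, bestSol) := by
  intro fuel
  induction fuel with
  | zero =>
    intro subs best bestSol i
    simp [pvGoA, pvLeaves, pvStep, pvSnapVal, pvSumaCuadratica, pvGSum, List.map_id']
  | succ fuel ih =>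
    intro subs best bestSol i
    -- per-j leaf list
    set L : Int → List (List (List (String × Int))) := fun j =>
      match PySem.List.pyGet? subs j with
      | some g =>
          if (g.length : Int) < (maestros.length : Int) - k + 1 then
            match PySem.List.pyGet? maestros i with
            | some m => pvLeaves maestros k ((maestros.length : Int) - k + 1) fuel
                (subs.set j.toNat (g ++ [m])) (i + 1)
            | none => []
          else []
      | none => [] with hL
    have hleaves : pvLeaves maestros k ((maestros.length : Int) - k + 1) (fuel + 1) subs i
        = (PySem.List.pyRange 0 k 1).flatMap L := by
      have h1 : pvLeaves maestros k ((maestros.length : Int) - k + 1) (fuel + 1) subs i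
          = (PySem.List.pyRange 0 k 1).foldl (fun out j => out ++ L j) [] := by
        apply PySem.List.foldl_congr_mem
        intro out j _
        rw [hL]
        cases hget : PySem.List.pyGet? subs j with
        | none => simp [hget]
        | some g =>
          by_cases hc : (g.length : Int) < (maestros.length : Int) - k + 1
          · cases hm : PySem.List.pyGet? maestros i with
            | none => simp [hget, hc]
            | some m => simp [hget, hc]
          · simp [hget, hc]
      rw [h1, PySem.List.foldl_append_eq_flatMap, List.nil_append]
    rw [hleaves, pv_foldl_flatMap]
    show (PySem.List.pyRange 0 k 1).foldl _ (best, bestSol)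
        = (PySem.List.pyRange 0 k 1).foldl _ (best, bestSol)
    apply PySem.List.foldl_congr_mem
    intro acc j _
    rw [hL]
    cases hget : PySem.List.pyGet? subs j with
    | none =>
      cases hm : PySem.List.pyGet? maestros i with
      | none => simp [hget]
      | some m => simp [hget]
    | some g =>
      cases hm : PySem.List.pyGet? maestros i with
      | none =>
        by_cases hc : (g.length : Int) < (maestros.length : Int) - k + 1
        · simp [hget, hc]
        · simp [hget, hc]
      | some m =>
        simp only [hget]
        by_cases hc : (g.length : Int) < (maestros.length : Int) - k + 1
        · rw [if_pos (show (((g ++ [m]).length : Int) - 1 ≤ (maestros.length : Int) - k) by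
              simp [List.length_append]; omega), if_pos hc]
          exact ih (subs.set j.toNat (g ++ [m])) acc.1 acc.2 (i + 1)
        · rw [if_neg (show ¬(((g ++ [m]).length : Int) - 1 ≤ (maestros.length : Int) - k) by
              simp [List.length_append]; omega), if_neg hc]
          simp

-- ===== VERDICT (by name: the statement is the Claim_ definition above) =====
theorem defensa_tribu_agua_backtracking_py_spec : Claim_equal_defensa_tribu_agua_backtracking_py := by
  intro maestros k subs best bestSol i _ _
  unfold Spec_defensa_tribu_agua_backtracking_py
  unfold defensa_tribu_agua_backtracking_py defensa_tribu_agua_backtracking_py_alt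
  exact pv_goA_eq maestros k _ subs best bestSol i
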